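-- pv_equiv track=rewrite | github.com/udonehn/Algorithm | 백준/Gold/20040. 사이클 게임/사이클 게임.py | solve
-- ===== SOURCE A (Python) =====
-- def find(parent, a):
--     if parent[a] == a:
--         return a
--     parent[a] = find(parent, parent[a])
--     return parent[a]
--
-- def solve(n, m, game):
--     parent = [i for i in range(n)]
--     count = 1
--     for a, b in game:
--         a_parent = find(parent, a)
--         b_parent = find(parent, b)
--         if a_parent == b_parent:
--             return count
--         parent[a_parent] = b_parent
--         count += 1
--     return 0
-- ===== SOURCE B (Python) =====
-- def solve(n, m, game):
--     # Component labels instead of a union-find forest: comp[v] is the label of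
--     # v's component; merging relabels the whole smaller... (full scan) class.
--     comp = list(range(n))
--     count = 1
--     for a, b in game:
--         ca = comp[a]
--         cb = comp[b]
--         if ca == cb:
--             return count
--         comp = [cb if c == ca else c for c in comp]
--         count += 1
--     return 0
-- ===== Notes on version B (the rewrite author's own statement) =====
-- stated objective: simpler
-- what changed: A's union-find forest (recursive find with path compression, parent-pointer mutation) is replaced by a flat component-label list: each edge compares the two labels and a merge relabels the merged class with one list scan, so there is no recursion and no parent structure.
-- outside the precondition, e.g. on solve(1, 2, [(0, 0), (5, 5)]): A returns 1, B returns 1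
import Mathlib
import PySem

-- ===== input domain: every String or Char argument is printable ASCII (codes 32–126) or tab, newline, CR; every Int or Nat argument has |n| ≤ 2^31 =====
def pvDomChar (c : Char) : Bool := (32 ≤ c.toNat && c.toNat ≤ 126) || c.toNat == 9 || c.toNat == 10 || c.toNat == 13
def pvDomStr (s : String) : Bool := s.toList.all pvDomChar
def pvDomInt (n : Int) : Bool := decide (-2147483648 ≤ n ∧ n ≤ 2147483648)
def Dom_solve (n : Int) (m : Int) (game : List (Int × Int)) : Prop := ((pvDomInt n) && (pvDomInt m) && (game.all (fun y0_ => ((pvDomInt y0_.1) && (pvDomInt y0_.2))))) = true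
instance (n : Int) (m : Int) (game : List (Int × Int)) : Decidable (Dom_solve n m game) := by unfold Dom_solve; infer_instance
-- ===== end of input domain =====

-- B replaces A's union-find forest (recursive find with path compression) by a flat
-- component-label list merged by a relabelling scan: simpler (no recursion, no mutation
-- of a parent structure), not faster. A mutates only its local `parent` list.

-- B replaces the union-find forest (recursive find with path compression) by a flat
-- component-label array that is merged by a full relabelling scan: simpler, no recursion.
-- A mutates its local `parent` list only; neither program mutates its arguments.

-- ===== PORT A =====
-- Python's `find` recursion has no structural measure, so the port carries a fuel
-- argument (`parent.length` at every call site; the proofs show it suffices inside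
-- Pre_, and the fuel-exhausted branch is never reached there).
def pvFind (fuel : Nat) (parent : List Int) (a : Int) : List Int × Int :=
  match fuel with
  | 0 => (parent, a)
  | f + 1 =>
    let pa := PySem.List.pyGetD parent a 0          -- parent[a]   (in range under Pre_)
    if pa = a then (parent, a)
    else
      let res := pvFind f parent pa                  -- find(parent, parent[a])
      let p2 := PySem.List.pySetD res.1 a res.2      -- parent[a] = …
      (p2, PySem.List.pyGetD p2 a 0)                 -- return parent[a]

-- the `for a, b in game` loop of A
def pvLoopA (fuel : Nat) (parent : List Int) (count : Int) (game : List (Int × Int)) : Int :=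
  match game with
  | [] => 0
  | (a, b) :: rest =>
    let r1 := pvFind fuel parent a
    let r2 := pvFind fuel r1.1 b
    if r1.2 = r2.2 then count
    else pvLoopA fuel (PySem.List.pySetD r2.1 r1.2 r2.2) (count + 1) rest

-- the `for a, b in game` loop of B
def pvLoopB (comp : List Int) (count : Int) (game : List (Int × Int)) : Int :=
  match game with
  | [] => 0
  | (a, b) :: rest =>
    let ca := PySem.List.pyGetD comp a 0
    let cb := PySem.List.pyGetD comp b 0
    if ca = cb then count
    else pvLoopB (comp.map fun c => if c = ca then cb else c) (count + 1) rest

def solve (n : Int) (m : Int) (game : List (Int × Int)) : Int :=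
  let parent := PySem.List.pyRange 0 n 1             -- [i for i in range(n)]
  pvLoopA parent.length parent 1 game

-- ===== PORT B =====
def solve_alt (n : Int) (m : Int) (game : List (Int × Int)) : Int :=
  pvLoopB (PySem.List.pyRange 0 n 1) 1 game

-- ===== PRECONDITION & SPEC =====
-- Pre_ admits every edge list whose endpoints lie in Python's indexable range [-n, n)
-- (negative endpoints index from the end, i.e. behave as the vertex endpoint+n, in A and
-- in B alike); outside it A raises IndexError, except on lists where an earlier edge
-- already closed a cycle so the out-of-range edge is never read.
def Pre_solve (n : Int) (m : Int) (game : List (Int × Int)) : Prop :=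
  ∀ e ∈ game, -n ≤ e.1 ∧ e.1 < n ∧ -n ≤ e.2 ∧ e.2 < n
instance (n : Int) (m : Int) (game : List (Int × Int)) : Decidable (Pre_solve n m game) := by
  unfold Pre_solve; infer_instance

def pvWitness_solve : Int × Int × (List (Int × Int)) := (3, 3, [(0, 1), (1, 2), (2, 0)])

def Spec_solve (n : Int) (m : Int) (game : List (Int × Int)) (out : Int) : Prop := out = solve_alt n m game
instance (n : Int) (m : Int) (game : List (Int × Int)) (out : Int) : Decidable (Spec_solve n m game out) := by unfold Spec_solve; infer_instance

-- ===== CLAIM (what is proved, stated in full; the proofs are below) =====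
def Claim_equal_solve : Prop := ∀ (n : Int) (m : Int) (game : List (Int × Int)), Dom_solve n m game → Pre_solve n m game → Spec_solve n m game (solve n m game)

-- ===== LEMMAS AND PROOFS =====

def pg (p : List Int) (i : Int) : Int := PySem.List.pyGetD p i 0

theorem pg_def (p : List Int) (i : Int) : PySem.List.pyGetD p i 0 = pg p i := rfl

inductive RootsTo (p : List Int) : Int → Int → Prop
  | isRoot (x : Int) : pg p x = x → RootsTo p x x
  | step (x r : Int) : pg p x ≠ x → RootsTo p (pg p x) r → RootsTo p x r

structure UF (n : Int) (p comp : List Int) (d : Int → Nat) : Prop where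
  plen : (p.length : Int) = n
  clen : (comp.length : Int) = n
  prange : ∀ i : Int, 0 ≤ i → i < n → 0 ≤ pg p i ∧ pg p i < n
  droot : ∀ i : Int, 0 ≤ i → i < n → pg p i = i → d i = 0
  dstep : ∀ i : Int, 0 ≤ i → i < n → pg p i ≠ i → d (pg p i) < d i
  dbound : ∀ i : Int, 0 ≤ i → i < n → d i < comp.count (pg comp i)
  classEq : ∀ i j : Int, 0 ≤ i → i < n → 0 ≤ j → j < n →
      (pg comp i = pg comp j ↔ ∃ r, RootsTo p i r ∧ RootsTo p j r)

theorem pg_pySetD_eq (p : List Int) (i v : Int) (h0 : 0 ≤ i) (h : i < (p.length : Int)) :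
    pg (PySem.List.pySetD p i v) i = v := by
  rw [pg, PySem.List.pySetD_of_nonneg p v h0,
    PySem.List.pyGetD_eq_getElem _ _ h0 (by simp; omega)]
  rw [List.getElem_set_self]

theorem pg_pySetD_ne (p : List Int) (i j v : Int) (h0 : 0 ≤ i) (h0' : 0 ≤ j) (hne : j ≠ i) :
    pg (PySem.List.pySetD p i v) j = pg p j := by
  rw [pg, pg, PySem.List.pySetD_of_nonneg p v h0]
  by_cases hj : j < (p.length : Int)
  · rw [PySem.List.pyGetD_eq_getElem _ _ h0' (by simpa using hj),
      PySem.List.pyGetD_eq_getElem _ _ h0' hj, List.getElem_set_ne (by omega)]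
  · rw [PySem.List.pyGetD_of_none _ _ _ (by
        rw [PySem.List.pyGet?_eq_none_iff]; intro hr
        rcases hr with ⟨h1, h2⟩; simp_all; omega),
      PySem.List.pyGetD_of_none _ _ _ (by
        rw [PySem.List.pyGet?_eq_none_iff]; intro hr
        rcases hr with ⟨h1, h2⟩; omega)]

theorem pg_range (n i : Int) (h0 : 0 ≤ i) (h : i < n) : pg (PySem.List.pyRange 0 n 1) i = i := by
  rw [pg, PySem.List.pyGetD_eq_getElem _ _ h0 (by rw [PySem.List.length_pyRange_one]; omega)]
  rw [PySem.List.getElem_pyRange_one]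
  omega

theorem pg_map (comp : List Int) (f : Int → Int) (i : Int) (h0 : 0 ≤ i)
    (h : i < (comp.length : Int)) : pg (comp.map f) i = f (pg comp i) := by
  rw [pg, pg, PySem.List.pyGetD_eq_getElem _ _ h0 (by simpa using h),
    PySem.List.pyGetD_eq_getElem _ _ h0 h, List.getElem_map]

theorem pg_wrap (xs : List Int) (i : Int) (h1 : -(xs.length : Int) ≤ i) (h2 : i < 0) :
    pg xs i = pg xs (i + xs.length) := by
  have hk1 : 0 < (-i).toNat := by omega
  have hk2 : (-i).toNat ≤ xs.length := by omega
  have hi : i = -(((-i).toNat : Nat) : Int) := by omega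
  rw [pg, pg, hi, PySem.List.pyGetD_neg_natCast xs _ 0 hk1 hk2,
    PySem.List.pyGetD_eq_getElem _ _ (by omega) (by omega)]
  congr 1
  omega

theorem pySetD_wrap (xs : List Int) (i v : Int) (h1 : -(xs.length : Int) ≤ i) (h2 : i < 0) :
    PySem.List.pySetD xs i v = PySem.List.pySetD xs (i + xs.length) v := by
  rw [PySem.List.pySetD, PySem.List.pySet?, PySem.List.pyIdx?,
    PySem.List.pySetD_of_nonneg xs v (by omega)]
  rw [if_neg (by omega), if_pos (by omega)]
  simp only [Option.map_some, Option.getD_some]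
  congr 1
  omega

theorem rootsTo_det {p : List Int} {x r s : Int} (h1 : RootsTo p x r) (h2 : RootsTo p x s) : r = s := by
  induction h1 generalizing s with
  | isRoot x hx => cases h2 with
    | isRoot => rfl
    | step _ _ hne => exact absurd hx hne
  | step x r hne hr ih => cases h2 with
    | isRoot _ hx => exact absurd hx hne
    | step _ _ _ hs => exact ih hs

theorem rootsTo_isRoot {p : List Int} {x r : Int} (h : RootsTo p x r) : pg p r = r := by
  induction h with
  | isRoot _ hx => exact hx
  | step _ _ _ _ ih => exact ih

theorem root_eq_self {p : List Int} {x r : Int} (h : RootsTo p x r) (hx : pg p x = x) : r = x := by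
  cases h with
  | isRoot => rfl
  | step _ _ hne => exact absurd hx hne

theorem rootsTo_range {n : Int} {p : List Int}
    (hpr : ∀ i : Int, 0 ≤ i → i < n → 0 ≤ pg p i ∧ pg p i < n)
    {x r : Int} (h : RootsTo p x r) (hx0 : 0 ≤ x) (hxn : x < n) : 0 ≤ r ∧ r < n := by
  induction h with
  | isRoot _ _ => exact ⟨hx0, hxn⟩
  | step y _ _ _ ih => exact ih (hpr y hx0 hxn).1 (hpr y hx0 hxn).2

theorem rootsTo_total {n : Int} {p comp : List Int} {d : Int → Nat} (h : UF n p comp d) :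
    ∀ (k : Nat) (x : Int), 0 ≤ x → x < n → d x ≤ k → ∃ r, RootsTo p x r := by
  intro k
  induction k with
  | zero =>
    intro x hx0 hxn hd
    by_cases hr : pg p x = x
    · exact ⟨x, .isRoot x hr⟩
    · exact absurd (h.dstep x hx0 hxn hr) (by omega)
  | succ k ih =>
    intro x hx0 hxn hd
    by_cases hr : pg p x = x
    · exact ⟨x, .isRoot x hr⟩
    · obtain ⟨r, hrr⟩ := ih (pg p x) (h.prange x hx0 hxn).1 (h.prange x hx0 hxn).2
        (by have := h.dstep x hx0 hxn hr; omega)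
      exact ⟨r, .step x r hr hrr⟩

theorem class_iff_root {n : Int} {p comp : List Int} {d : Int → Nat} (h : UF n p comp d)
    {i j ri rj : Int} (hi0 : 0 ≤ i) (hin : i < n) (hj0 : 0 ≤ j) (hjn : j < n)
    (hri : RootsTo p i ri) (hrj : RootsTo p j rj) :
    pg comp i = pg comp j ↔ ri = rj := by
  rw [h.classEq i j hi0 hin hj0 hjn]
  constructor
  · rintro ⟨r, h1, h2⟩
    rw [← rootsTo_det h1 hri, ← rootsTo_det h2 hrj]
  · intro he
    exact ⟨ri, hri, he ▸ hrj⟩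

theorem rootsTo_compress {n : Int} {p : List Int} {a r : Int}
    (hlen : (p.length : Int) = n)
    (hpr : ∀ i : Int, 0 ≤ i → i < n → 0 ≤ pg p i ∧ pg p i < n)
    (ha0 : 0 ≤ a) (han : a < n) (hr0 : 0 ≤ r) (hrn : r < n)
    (hroot : pg p r = r) (hne : r ≠ a) (har : RootsTo p a r) :
    ∀ x s : Int, 0 ≤ x → x < n →
      (RootsTo (PySem.List.pySetD p a r) x s ↔ RootsTo p x s) := by
  have hga : pg (PySem.List.pySetD p a r) a = r := pg_pySetD_eq p a r ha0 (by omega)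
  have hgo : ∀ j : Int, 0 ≤ j → j ≠ a → pg (PySem.List.pySetD p a r) j = pg p j :=
    fun j hj hja => pg_pySetD_ne p a j r ha0 hj hja
  have fwd : ∀ x s : Int, RootsTo (PySem.List.pySetD p a r) x s → 0 ≤ x → x < n → RootsTo p x s := by
    intro x s hder
    induction hder with
    | isRoot y hy =>
      intro hy0 hyn
      by_cases hya : y = a
      · subst hya; rw [hga] at hy; exact absurd hy hne
      · rw [hgo y hy0 hya] at hy; exact .isRoot y hy
    | step y t hst hrec ih =>
      intro hy0 hyn
      by_cases hya : y = a
      · rw [hya] at ih ⊢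
        rw [hga] at ih
        have h1 : RootsTo p r t := ih hr0 hrn
        have ht : t = r := root_eq_self h1 hroot
        rw [ht]
        exact har
      · rw [hgo y hy0 hya] at hst ih
        exact .step y t hst (ih (hpr y hy0 hyn).1 (hpr y hy0 hyn).2)
  have bwd : ∀ x s : Int, RootsTo p x s → 0 ≤ x → x < n → RootsTo (PySem.List.pySetD p a r) x s := by
    intro x s hder
    induction hder with
    | isRoot y hy =>
      intro hy0 hyn
      by_cases hya : y = a
      · rw [hya] at hy; rw [hya]; exact absurd (root_eq_self har hy) hne
      · exact .isRoot y (by rw [hgo y hy0 hya]; exact hy)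
    | step y t hst hrec ih =>
      intro hy0 hyn
      by_cases hya : y = a
      · rw [hya] at hst hrec ⊢
        have ht : t = r := rootsTo_det (.step a t hst hrec) har
        rw [ht]
        have hrr : RootsTo (PySem.List.pySetD p a r) r r :=
          .isRoot r (by rw [hgo r hr0 hne]; exact hroot)
        exact RootsTo.step a r (by rw [hga]; exact hne) (by rw [hga]; exact hrr)
      · exact .step y t (by rw [hgo y hy0 hya]; exact hst)
          (by rw [hgo y hy0 hya]; exact ih (hpr y hy0 hyn).1 (hpr y hy0 hyn).2)
  exact fun x s hx0 hxn => ⟨fun h => fwd x s h hx0 hxn, fun h => bwd x s h hx0 hxn⟩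

theorem pvFind_spec {n : Int} {comp : List Int} {d : Int → Nat} :
    ∀ (fuel : Nat) (p : List Int) (a : Int), UF n p comp d → 0 ≤ a → a < n → d a < fuel →
    ∃ r : Int, RootsTo p a r ∧
      (pvFind fuel p a).2 = r ∧
      (pvFind fuel p a).1.length = p.length ∧
      UF n (pvFind fuel p a).1 comp d ∧
      (∀ x s : Int, 0 ≤ x → x < n → (RootsTo (pvFind fuel p a).1 x s ↔ RootsTo p x s)) := by
  intro fuel
  induction fuel with
  | zero => intro p a _ _ _ hd; omega
  | succ f ih =>
    intro p a hUF ha0 han hd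
    by_cases hpa : pg p a = a
    · refine ⟨a, .isRoot a hpa, ?_⟩
      simp only [pvFind, pg_def, if_pos hpa]
      exact ⟨trivial, trivial, hUF, fun _ _ _ _ => trivial⟩
    · have hpar := hUF.prange a ha0 han
      have hdp := hUF.dstep a ha0 han hpa
      obtain ⟨r, hr, hv, hlen1, hUF1, heq1⟩ := ih p (pg p a) hUF hpar.1 hpar.2 (by omega)
      have hra : RootsTo p a r := .step a r hpa hr
      -- r is a root of p, in range, distinct from a
      have hroot : pg p r = r := rootsTo_isRoot hr
      have hrrange := rootsTo_range hUF.prange hra ha0 han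
      have hdr : d r = 0 := hUF.droot r hrrange.1 hrrange.2 hroot
      have hrne : r ≠ a := by
        intro hcon
        have := hUF.dstep a ha0 han hpa
        rw [hcon] at hdr
        omega
      -- facts about p1 := (pvFind f p (pg p a)).1
      have hra1 : RootsTo (pvFind f p (pg p a)).1 a r := (heq1 a r ha0 han).mpr hra
      have hroot1 : pg (pvFind f p (pg p a)).1 r = r := rootsTo_isRoot hra1
      have hlenInt : ((pvFind f p (pg p a)).1.length : Int) = n := by rw [hlen1]; exact hUF.plen
      -- the compressed parent list p2
      have hcomp := rootsTo_compress (p := (pvFind f p (pg p a)).1) (a := a) (r := r)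
        hlenInt hUF1.prange ha0 han hrrange.1 hrrange.2 hroot1 hrne hra1
      have hga2 : pg (PySem.List.pySetD (pvFind f p (pg p a)).1 a r) a = r :=
        pg_pySetD_eq _ a r ha0 (by omega)
      refine ⟨r, hra, ?_, ?_, ?_, ?_⟩
      · simp only [pvFind, pg_def, if_neg hpa]
        rw [hv]
        exact hga2
      · simp only [pvFind, pg_def, if_neg hpa]
        rw [hv, PySem.List.length_pySetD, hlen1]
      · simp only [pvFind, pg_def, if_neg hpa]
        rw [hv]
        constructor
        · rw [PySem.List.length_pySetD]; exact hlenInt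
        · exact hUF1.clen
        · -- prange
          intro i hi0 hin
          by_cases hia : i = a
          · rw [hia, hga2]; exact hrrange
          · rw [pg_pySetD_ne _ a i r ha0 hi0 hia]; exact hUF1.prange i hi0 hin
        · -- droot
          intro i hi0 hin hroo
          by_cases hia : i = a
          · rw [hia, hga2] at hroo; exact absurd hroo hrne
          · rw [pg_pySetD_ne _ a i r ha0 hi0 hia] at hroo; exact hUF1.droot i hi0 hin hroo
        · -- dstep
          intro i hi0 hin hne2
          by_cases hia : i = a
          · rw [hia, hga2]; rw [hdr]; rw [hia] at hne2; omega
          · rw [pg_pySetD_ne _ a i r ha0 hi0 hia] at hne2 ⊢; exact hUF1.dstep i hi0 hin hne2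
        · exact hUF1.dbound
        · -- classEq
          intro i j hi0 hin hj0 hjn
          rw [hUF1.classEq i j hi0 hin hj0 hjn]
          constructor
          · rintro ⟨t, ht1, ht2⟩
            exact ⟨t, (hcomp i t hi0 hin).mpr ht1, (hcomp j t hj0 hjn).mpr ht2⟩
          · rintro ⟨t, ht1, ht2⟩
            exact ⟨t, (hcomp i t hi0 hin).mp ht1, (hcomp j t hj0 hjn).mp ht2⟩
      · simp only [pvFind, pg_def, if_neg hpa]
        rw [hv]
        intro x s hx0 hxn
        exact (hcomp x s hx0 hxn).trans (heq1 x s hx0 hxn)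

theorem count_map_relabel (l : List Int) (ca cb : Int) (h : ca ≠ cb) :
    (l.map fun c => if c = ca then cb else c).count cb = l.count ca + l.count cb := by
  induction l with
  | nil => rfl
  | cons x l ih =>
    simp only [List.map_cons, List.count_cons, ih]
    split_ifs with h1 <;> simp_all [List.count_cons] <;> omega

theorem count_map_relabel_other (l : List Int) (ca cb v : Int) (h1 : v ≠ ca) (h2 : v ≠ cb) :
    (l.map fun c => if c = ca then cb else c).count v = l.count v := by
  induction l with
  | nil => rfl
  | cons x l ih =>
    simp only [List.map_cons, List.count_cons, ih]
    split_ifs with h3 <;> simp_all [List.count_cons]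

theorem count_pos_of_mem (comp : List Int) (b : Int) (hb0 : 0 ≤ b) (hbn : b < (comp.length : Int)) :
    1 ≤ comp.count (pg comp b) := by
  have : pg comp b ∈ comp := by
    rw [pg, PySem.List.pyGetD_eq_getElem _ _ hb0 hbn]
    exact List.getElem_mem _
  exact List.count_pos_iff.mpr this

theorem rootsTo_union {n : Int} {p : List Int} {ra rb : Int}
    (hlen : (p.length : Int) = n)
    (hpr : ∀ i : Int, 0 ≤ i → i < n → 0 ≤ pg p i ∧ pg p i < n)
    (hra0 : 0 ≤ ra) (hran : ra < n) (hrb0 : 0 ≤ rb) (hrbn : rb < n)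
    (hroa : pg p ra = ra) (hrob : pg p rb = rb) (hne : ra ≠ rb) :
    ∀ x r : Int, 0 ≤ x → x < n → RootsTo p x r →
      RootsTo (PySem.List.pySetD p ra rb) x (if r = ra then rb else r) := by
  have hga : pg (PySem.List.pySetD p ra rb) ra = rb := pg_pySetD_eq p ra rb hra0 (by omega)
  have hgo : ∀ j : Int, 0 ≤ j → j ≠ ra → pg (PySem.List.pySetD p ra rb) j = pg p j :=
    fun j hj hja => pg_pySetD_ne p ra j rb hra0 hj hja
  have hrbroot : RootsTo (PySem.List.pySetD p ra rb) rb rb :=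
    .isRoot rb (by rw [hgo rb hrb0 (fun hc => hne hc.symm)]; exact hrob)
  intro x r hx0 hxn hder
  induction hder with
  | isRoot y hy =>
    by_cases hya : y = ra
    · rw [hya, if_pos rfl]
      exact .step ra rb (by rw [hga]; exact fun hc => hne hc.symm) (by rw [hga]; exact hrbroot)
    · rw [if_neg hya]
      exact .isRoot y (by rw [hgo y hx0 hya]; exact hy)
  | step y t hst hrec ih =>
    have hya : y ≠ ra := by intro hc; rw [hc] at hst; exact hst hroa
    exact .step y _ (by rw [hgo y hx0 hya]; exact hst)
      (by rw [hgo y hx0 hya]; exact ih (hpr y hx0 hxn).1 (hpr y hx0 hxn).2)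

theorem UF_union {n : Int} {p comp : List Int} {d : Int → Nat}
    (h : UF n p comp d) {a b ra rb : Int}
    (ha0 : 0 ≤ a) (han : a < n) (hb0 : 0 ≤ b) (hbn : b < n)
    (hra : RootsTo p a ra) (hrb : RootsTo p b rb) (hne : ra ≠ rb) :
    UF n (PySem.List.pySetD p ra rb)
      (comp.map fun c => if c = pg comp a then pg comp b else c)
      (fun x : Int => if 0 ≤ x ∧ x < n ∧ pg comp x = pg comp a then d x + 1 else d x) := by
  have hrarange := rootsTo_range h.prange hra ha0 han
  have hrbrange := rootsTo_range h.prange hrb hb0 hbn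
  have hroa : pg p ra = ra := rootsTo_isRoot hra
  have hrob : pg p rb = rb := rootsTo_isRoot hrb
  have hraself : RootsTo p ra ra := .isRoot ra hroa
  have hrbself : RootsTo p rb rb := .isRoot rb hrob
  have htot : ∀ x : Int, 0 ≤ x → x < n → ∃ r, RootsTo p x r := fun x hx0 hxn =>
    rootsTo_total h (d x) x hx0 hxn le_rfl
  have hclassA : ∀ (i ri : Int), 0 ≤ i → i < n → RootsTo p i ri →
      (pg comp i = pg comp a ↔ ri = ra) := fun i ri hi0 hin hri =>
    class_iff_root h hi0 hin ha0 han hri hra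
  have hclassB : ∀ (i ri : Int), 0 ≤ i → i < n → RootsTo p i ri →
      (pg comp i = pg comp b ↔ ri = rb) := fun i ri hi0 hin hri =>
    class_iff_root h hi0 hin hb0 hbn hri hrb
  have hcab : pg comp a ≠ pg comp b := fun hc => hne ((hclassB a ra ha0 han hra).mp hc)
  have hga : pg (PySem.List.pySetD p ra rb) ra = rb :=
    pg_pySetD_eq p ra rb hrarange.1 (by have := h.plen; omega)
  have hgo : ∀ j : Int, 0 ≤ j → j ≠ ra → pg (PySem.List.pySetD p ra rb) j = pg p j :=
    fun j hj hja => pg_pySetD_ne p ra j rb hrarange.1 hj hja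
  have hunion := rootsTo_union h.plen h.prange hrarange.1 hrarange.2 hrbrange.1 hrbrange.2
    hroa hrob hne
  have hclen := h.clen
  have hcm : ∀ i : Int, 0 ≤ i → i < n →
      pg (comp.map fun c => if c = pg comp a then pg comp b else c) i =
        (if pg comp i = pg comp a then pg comp b else pg comp i) :=
    fun i hi0 hin => pg_map comp _ i hi0 (by omega)
  have hedge : ∀ i : Int, 0 ≤ i → i < n → pg p i ≠ i → pg comp (pg p i) = pg comp i := by
    intro i hi0 hin hnei
    obtain ⟨ri, hri⟩ := htot i hi0 hin
    have hstep : RootsTo p (pg p i) ri := by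
      cases hri with
      | isRoot _ hx => exact absurd hx hnei
      | step _ _ _ hrec => exact hrec
    exact (class_iff_root h (h.prange i hi0 hin).1 (h.prange i hi0 hin).2 hi0 hin hstep hri).mpr rfl
  have hroota : pg comp ra = pg comp a := (hclassA ra ra hrarange.1 hrarange.2 hraself).mpr rfl
  have hrootb : pg comp rb = pg comp b := (hclassB rb rb hrbrange.1 hrbrange.2 hrbself).mpr rfl
  constructor
  · rw [PySem.List.length_pySetD]; exact h.plen
  · rw [List.length_map]; exact h.clen
  · -- prange
    intro i hi0 hin
    by_cases hia : i = ra
    · rw [hia, hga]; exact hrbrange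
    · rw [hgo i hi0 hia]; exact h.prange i hi0 hin
  · -- droot
    intro i hi0 hin hroo
    by_cases hia : i = ra
    · rw [hia, hga] at hroo; exact absurd hroo.symm hne
    · rw [hgo i hi0 hia] at hroo
      have hni : pg comp i ≠ pg comp a :=
        fun hc => hia ((hclassA i i hi0 hin (.isRoot i hroo)).mp hc)
      rw [if_neg (by rintro ⟨-, -, hc⟩; exact hni hc)]
      exact h.droot i hi0 hin hroo
  · -- dstep
    intro i hi0 hin hnei
    by_cases hia : i = ra
    · rw [hia, hga]
      rw [if_neg (by rintro ⟨-, -, hc⟩; rw [hrootb] at hc; exact hcab hc.symm)]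
      rw [if_pos ⟨hrarange.1, hrarange.2, hroota⟩]
      have hdrb : d rb = 0 := h.droot rb hrbrange.1 hrbrange.2 hrob
      omega
    · rw [hgo i hi0 hia] at hnei ⊢
      have hlt := h.dstep i hi0 hin hnei
      have hcc : pg comp (pg p i) = pg comp i := hedge i hi0 hin hnei
      have hpr := h.prange i hi0 hin
      by_cases hcl : pg comp i = pg comp a
      · rw [if_pos ⟨hpr.1, hpr.2, by rw [hcc]; exact hcl⟩, if_pos ⟨hi0, hin, hcl⟩]
        omega
      · rw [if_neg (by rintro ⟨-, -, hc⟩; rw [hcc] at hc; exact hcl hc),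
          if_neg (by rintro ⟨-, -, hc⟩; exact hcl hc)]
        exact hlt
  · -- dbound
    intro i hi0 hin
    have hpr := h.dbound i hi0 hin
    have hcntb : 1 ≤ comp.count (pg comp b) := count_pos_of_mem comp b hb0 (by omega)
    rw [hcm i hi0 hin]
    by_cases hcl : pg comp i = pg comp a
    · rw [if_pos hcl, count_map_relabel comp _ _ hcab, if_pos ⟨hi0, hin, hcl⟩]
      rw [hcl] at hpr
      omega
    · rw [if_neg hcl, if_neg (by rintro ⟨-, -, hc⟩; exact hcl hc)]
      by_cases hcb : pg comp i = pg comp b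
      · rw [hcb, count_map_relabel comp _ _ hcab]
        rw [hcb] at hpr
        omega
      · rw [count_map_relabel_other comp _ _ _ hcl hcb]
        exact hpr
  · -- classEq
    intro i j hi0 hin hj0 hjn
    obtain ⟨ri, hri⟩ := htot i hi0 hin
    obtain ⟨rj, hrj⟩ := htot j hj0 hjn
    have hui := hunion i ri hi0 hin hri
    have huj := hunion j rj hj0 hjn hrj
    rw [hcm i hi0 hin, hcm j hj0 hjn]
    have hrhs : (∃ r, RootsTo (PySem.List.pySetD p ra rb) i r ∧
        RootsTo (PySem.List.pySetD p ra rb) j r) ↔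
        (if ri = ra then rb else ri) = (if rj = ra then rb else rj) := by
      constructor
      · rintro ⟨r, hx1, hx2⟩
        rw [← rootsTo_det hx1 hui, ← rootsTo_det hx2 huj]
      · intro he
        exact ⟨_, hui, he ▸ huj⟩
    rw [hrhs]
    have hia := hclassA i ri hi0 hin hri
    have hja := hclassA j rj hj0 hjn hrj
    have hib := hclassB i ri hi0 hin hri
    have hjb := hclassB j rj hj0 hjn hrj
    have hij : pg comp i = pg comp j ↔ ri = rj := class_iff_root h hi0 hin hj0 hjn hri hrj
    by_cases h1 : pg comp i = pg comp a <;> by_cases h2 : pg comp j = pg comp a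
    · have e1 : ri = ra := hia.mp h1
      have e2 : rj = ra := hja.mp h2
      simp [h1, h2, e1, e2]
    · have e1 : ri = ra := hia.mp h1
      have e2 : rj ≠ ra := fun hc => h2 (hja.mpr hc)
      rw [if_pos h1, if_neg h2, if_pos e1, if_neg e2]
      rw [eq_comm, hjb, eq_comm]
    · have e1 : ri ≠ ra := fun hc => h1 (hia.mpr hc)
      have e2 : rj = ra := hja.mp h2
      rw [if_neg h1, if_pos h2, if_neg e1, if_pos e2]
      rw [hib]
    · have e1 : ri ≠ ra := fun hc => h1 (hia.mpr hc)
      have e2 : rj ≠ ra := fun hc => h2 (hja.mpr hc)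
      rw [if_neg h1, if_neg h2, if_neg e1, if_neg e2]
      exact hij

theorem pvFind_length : ∀ (fuel : Nat) (p : List Int) (a : Int),
    (pvFind fuel p a).1.length = p.length := by
  intro fuel
  induction fuel with
  | zero => intro p a; rfl
  | succ f ih =>
    intro p a
    simp only [pvFind]
    by_cases h : PySem.List.pyGetD p a 0 = a
    · rw [if_pos h]
    · rw [if_neg h]
      simp only [PySem.List.length_pySetD, ih]

theorem pvFind_root (f : Nat) (p : List Int) (x : Int) (h : pg p x = x) :
    pvFind f p x = (p, x) := by
  cases f with
  | zero => rfl
  | succ f => simp only [pvFind, pg_def, if_pos h]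

theorem pvFind_wrap (f : Nat) (p : List Int) (a : Int)
    (h1 : -(p.length : Int) ≤ a) (h2 : a < 0)
    (hpr : ∀ j : Int, 0 ≤ j → j < (p.length : Int) → 0 ≤ pg p j) :
    pvFind (f + 1) p a = pvFind (f + 1) p (a + p.length) := by
  have hwg : pg p a = pg p (a + p.length) := pg_wrap p a h1 h2
  have hpa0 : 0 ≤ pg p (a + p.length) := hpr _ (by omega) (by omega)
  simp only [pvFind, pg_def, hwg]
  rw [if_neg (by omega)]
  by_cases hroot : pg p (a + p.length) = a + p.length
  · rw [if_pos hroot]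
    have hr : pg p (pg p (a + p.length)) = pg p (a + p.length) := by
      rw [hroot]; exact hroot ▸ hroot
    rw [pvFind_root f p _ hr]
    have hgetE : p[(a + (p.length : Int)).toNat] = pg p (a + p.length) :=
      (PySem.List.pyGetD_eq_getElem p 0 (by omega) (by omega)).symm
    have hset : PySem.List.pySetD p a (pg p (a + p.length)) = p := by
      rw [pySetD_wrap p a _ h1 h2, PySem.List.pySetD_of_nonneg _ _ (by omega), ← hgetE]
      exact List.set_getElem_self (by omega)
    rw [hset]
    rw [hwg, hroot]
  · rw [if_neg hroot]
    have hlr : ((pvFind f p (pg p (a + p.length))).1.length : Int) = p.length := by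
      rw [pvFind_length]
    have hs : PySem.List.pySetD (pvFind f p (pg p (a + p.length))).1 a
        (pvFind f p (pg p (a + p.length))).2 =
        PySem.List.pySetD (pvFind f p (pg p (a + p.length))).1 (a + p.length)
        (pvFind f p (pg p (a + p.length))).2 := by
      rw [pySetD_wrap _ a _ (by omega) h2, hlr]
    rw [hs]
    congr 1
    rw [pg_wrap _ a (by rw [PySem.List.length_pySetD]; omega) h2,
      PySem.List.length_pySetD, hlr]

theorem loop_eq {n : Int} :
    ∀ (game : List (Int × Int)) (p comp : List Int) (d : Int → Nat) (count : Int),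
    UF n p comp d →
    (∀ e ∈ game, -n ≤ e.1 ∧ e.1 < n ∧ -n ≤ e.2 ∧ e.2 < n) →
    pvLoopA p.length p count game = pvLoopB comp count game := by
  intro game
  induction game with
  | nil => intro p comp d count _ _; rfl
  | cons e rest ih =>
    intro p comp d count hUF hpre
    obtain ⟨a0, b0⟩ := e
    obtain ⟨ha0w, hanw, hb0w, hbnw⟩ := hpre (a0, b0) List.mem_cons_self
    have hrest : ∀ e ∈ rest, -n ≤ e.1 ∧ e.1 < n ∧ -n ≤ e.2 ∧ e.2 < n :=
      fun e he => hpre e (List.mem_cons_of_mem _ he)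
    have hn : 0 < n := by omega
    have hplen := hUF.plen
    have hclen := hUF.clen
    -- normalise a negative (wrapping) endpoint to the vertex it denotes
    set a : Int := if a0 < 0 then a0 + n else a0 with ha_def
    set b : Int := if b0 < 0 then b0 + n else b0 with hb_def
    have ha0 : 0 ≤ a := by rw [ha_def]; split_ifs <;> omega
    have han : a < n := by rw [ha_def]; split_ifs <;> omega
    have hb0 : 0 ≤ b := by rw [hb_def]; split_ifs <;> omega
    have hbn : b < n := by rw [hb_def]; split_ifs <;> omega
    have hsucc : ∃ f, p.length = f + 1 := ⟨p.length - 1, by omega⟩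
    obtain ⟨fl, hfl⟩ := hsucc
    have hprA : ∀ j : Int, 0 ≤ j → j < (p.length : Int) → 0 ≤ pg p j := by
      intro j hj0 hjn; exact (hUF.prange j hj0 (by omega)).1
    have hfindA : pvFind p.length p a0 = pvFind p.length p a := by
      rw [ha_def]; split_ifs with hneg
      · rw [hfl, pvFind_wrap fl p a0 (by omega) hneg hprA]
        congr 1; omega
      · rfl
    have hgB : pg comp a0 = pg comp a := by
      rw [ha_def]; split_ifs with hneg
      · rw [pg_wrap comp a0 (by omega) hneg]; congr 1; omega
      · rfl
    -- fuel suffices for both finds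
    have hfuelA : d a < p.length := by
      have h1 := hUF.dbound a ha0 han
      have h2 := List.count_le_length (l := comp) (a := pg comp a)
      have h3 := hUF.clen
      have h4 := hUF.plen
      omega
    obtain ⟨ra, hra, hva, hlena, hUF1, heq1⟩ := pvFind_spec p.length p a hUF ha0 han hfuelA
    have hprA1 : ∀ j : Int, 0 ≤ j → j < ((pvFind p.length p a).1.length : Int) → 0 ≤ pg (pvFind p.length p a).1 j := by
      intro j hj0 hjn
      refine (hUF1.prange j hj0 ?_).1
      rw [pvFind_length] at hjn; omega
    have hfindB : pvFind p.length (pvFind p.length p a).1 b0 = pvFind p.length (pvFind p.length p a).1 b := by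
      rw [hb_def]; split_ifs with hneg
      · have h := pvFind_wrap fl ((pvFind p.length p a).1) b0
          (by rw [pvFind_length]; omega) hneg hprA1
        rw [← hfl] at h
        rw [h]
        congr 1; rw [pvFind_length]; omega
      · rfl
    have hgB2 : pg comp b0 = pg comp b := by
      rw [hb_def]; split_ifs with hneg
      · rw [pg_wrap comp b0 (by omega) hneg]; congr 1; omega
      · rfl
    have hfuelB : d b < p.length := by
      have h1 := hUF.dbound b hb0 hbn
      have h2 := List.count_le_length (l := comp) (a := pg comp b)
      have h3 := hUF.clen
      have h4 := hUF.plen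
      omega
    obtain ⟨rb, hrb1, hvb, hlenb, hUF2, heq2⟩ :=
      pvFind_spec p.length (pvFind p.length p a).1 b hUF1 hb0 hbn hfuelB
    have hrb : RootsTo p b rb := (heq1 b rb hb0 hbn).mp hrb1
    -- the two tests agree
    have htest : pg comp a = pg comp b ↔ ra = rb := class_iff_root hUF ha0 han hb0 hbn hra hrb
    simp only [pvLoopA, pvLoopB, pg_def]
    rw [hfindA, hgB, hgB2, hfindB, hva, hvb]
    by_cases hc : ra = rb
    · rw [if_pos hc, if_pos (htest.mpr hc)]
    · rw [if_neg hc, if_neg (fun hcc => hc (htest.mp hcc))]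
      -- roots of a and b inside the doubly-updated parent list
      have hra2 : RootsTo (pvFind p.length (pvFind p.length p a).1 b).1 a ra :=
        ((heq2 a ra ha0 han).trans (heq1 a ra ha0 han)).mpr hra
      have hrb2 : RootsTo (pvFind p.length (pvFind p.length p a).1 b).1 b rb :=
        (heq2 b rb hb0 hbn).mpr hrb1
      have hUF3 := UF_union hUF2 ha0 han hb0 hbn hra2 hrb2 hc
      have hlen3 : (PySem.List.pySetD (pvFind p.length (pvFind p.length p a).1 b).1 ra rb).length
          = p.length := by
        rw [PySem.List.length_pySetD, hlenb, hlena]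
      have := ih (PySem.List.pySetD (pvFind p.length (pvFind p.length p a).1 b).1 ra rb)
        (comp.map fun c => if c = pg comp a then pg comp b else c)
        (fun x : Int => if 0 ≤ x ∧ x < n ∧ pg comp x = pg comp a then d x + 1 else d x)
        (count + 1) hUF3 hrest
      rw [hlen3] at this
      exact this

theorem UF_init (n : Int) (hn : 0 < n) :
    UF n (PySem.List.pyRange 0 n 1) (PySem.List.pyRange 0 n 1) (fun _ => 0) := by
  have hlen : ((PySem.List.pyRange 0 n 1).length : Int) = n := by
    rw [PySem.List.length_pyRange_one]; omega
  have hroots : ∀ x r : Int, RootsTo (PySem.List.pyRange 0 n 1) x r → 0 ≤ x → x < n → r = x := by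
    intro x r h hx0 hxn
    exact root_eq_self h (pg_range n x hx0 hxn)
  constructor
  · exact hlen
  · exact hlen
  · intro i hi0 hin; rw [pg_range n i hi0 hin]; exact ⟨hi0, hin⟩
  · intro _ _ _ _; rfl
  · intro i hi0 hin hne; exact absurd (pg_range n i hi0 hin) hne
  · intro i hi0 hin
    rw [pg_range n i hi0 hin]
    have : i ∈ PySem.List.pyRange 0 n 1 := PySem.List.mem_pyRange_one.mpr ⟨hi0, hin⟩
    simpa using List.count_pos_iff.mpr this
  · intro i j hi0 hin hj0 hjn
    rw [pg_range n i hi0 hin, pg_range n j hj0 hjn]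
    constructor
    · intro hij
      exact ⟨i, .isRoot i (pg_range n i hi0 hin), hij ▸ .isRoot i (pg_range n i hi0 hin)⟩
    · rintro ⟨r, h1, h2⟩
      rw [← hroots i r h1 hi0 hin, ← hroots j r h2 hj0 hjn]

theorem solve_alt_eq (n : Int) (m : Int) (game : List (Int × Int))
    (hpre : ∀ e ∈ game, -n ≤ e.1 ∧ e.1 < n ∧ -n ≤ e.2 ∧ e.2 < n) :
    solve n m game = solve_alt n m game := by
  cases game with
  | nil => rfl
  | cons e rest =>
    have he := hpre e List.mem_cons_self
    have hn : 0 < n := by omega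
    exact loop_eq (e :: rest) (PySem.List.pyRange 0 n 1) (PySem.List.pyRange 0 n 1)
      (fun _ => 0) 1 (UF_init n hn) hpre

-- ===== VERDICT (by name: the statement is the Claim_ definition above) =====
theorem solve_spec : Claim_equal_solve := by
  intro n m game _ hpre
  unfold Spec_solve
  exact solve_alt_eq n m game hpre
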